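-- pv_equiv track=rewrite | github.com/Ezrastrading/Ezras-trading-ai | trading-ai/src/trading_ai/shark/kalshi_expiry_tiers.py | _parse_priority
-- ===== SOURCE A (Python) =====
-- from typing import Dict, List, Optional, Sequence, Tuple
--
-- _DEFAULT_PRIORITY: Tuple[str, ...] = ("A", "B", "C")
--
-- def _parse_priority(raw: str) -> Tuple[str, ...]:
--     s = (raw or "").strip().upper()
--     if not s:
--         return _DEFAULT_PRIORITY
--     out: List[str] = []
--     for p in s.split(","):
--         x = p.strip().upper()
--         if x in ("A", "B", "C") and x not in out:
--             out.append(x)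
--     for x in ("A", "B", "C"):
--         if x not in out:
--             out.append(x)
--     return tuple(out)
-- ===== SOURCE B (Python) =====
-- def _parse_priority(raw):
--     tokens = [p.strip().upper() for p in (raw or "").strip().upper().split(",")]
--     big = len(tokens)
--     first = {}
--     for i, t in enumerate(tokens):
--         if t in ("A", "B", "C") and t not in first:
--             first[t] = i
--     return tuple(sorted("ABC", key=lambda x: first.get(x, big + "ABC".index(x))))
-- ===== Notes on version B (the rewrite author's own statement) =====
-- stated objective: alternative
-- what changed: Replaces A's two accumulation passes (append-if-new dedup list, then a fill-in loop for missing letters) with one pass recording each valid letter's first-occurrence index in a dict and a single stable sort of ['A','B','C'] keyed by that index (absent letters keyed past the end in canonical order), which also makes A's empty-string early return unnecessary.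
import Mathlib
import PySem

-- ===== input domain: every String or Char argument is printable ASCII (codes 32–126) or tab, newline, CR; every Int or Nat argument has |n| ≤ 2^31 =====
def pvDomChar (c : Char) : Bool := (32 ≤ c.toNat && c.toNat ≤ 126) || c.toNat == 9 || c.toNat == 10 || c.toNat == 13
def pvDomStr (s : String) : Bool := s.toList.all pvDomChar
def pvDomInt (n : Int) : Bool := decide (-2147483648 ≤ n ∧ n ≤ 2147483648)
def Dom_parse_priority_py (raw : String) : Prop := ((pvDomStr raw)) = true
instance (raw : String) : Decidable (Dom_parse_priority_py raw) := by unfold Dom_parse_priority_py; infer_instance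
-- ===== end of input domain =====

-- B replaces A's two accumulation loops (ordered dedup list + fill-in pass) by one pass recording
-- each letter's first-occurrence index in a dict and a single stable sort of ["A","B","C"] by that
-- index (absent letters keyed past the end in canonical order); objective: alternative decomposition.

-- ===== PORT A =====
def parse_priority_py (raw : String) : List String :=
  let s := PySem.Str.upper (PySem.Str.strip raw)
  if s = "" then ["A", "B", "C"]
  else
    let out := ((PySem.Str.split? s ",").getD []).foldl
      (fun (out : List String) p =>
        let x := PySem.Str.upper (PySem.Str.strip p)
        if (x = "A" ∨ x = "B" ∨ x = "C") ∧ x ∉ out then out ++ [x] else out) []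
    -- second loop: append the missing letters in canonical order
    ["A", "B", "C"].foldl (fun acc x => if x ∉ acc then acc ++ [x] else acc) out
    -- (split? with the literal separator "," is always `some`; `.getD []` only totalizes it)

-- ===== PORT B =====
def parse_priority_py_alt (raw : String) : List String :=
  let s := PySem.Str.upper (PySem.Str.strip raw)
  let tokens := ((PySem.Str.split? s ",").getD []).map
      (fun p => PySem.Str.upper (PySem.Str.strip p))
  let big : Int := tokens.length
  let first := (PySem.List.enumerate tokens).foldl
      (fun (d : PySem.Dict String Int) it =>
        if (it.2 = "A" ∨ it.2 = "B" ∨ it.2 = "C") ∧ d.contains it.2 = false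
        then d.insert it.2 it.1 else d)
      PySem.Dict.empty
  -- sorted("ABC", key=lambda x: first.get(x, big + "ABC".index(x)));  "ABC".index is ported as
  -- PySem.Str.find, which agrees with .index on every x the key is applied to ("A","B","C")
  PySem.List.sorted ["A", "B", "C"]
    (fun x => first.getD x (big + PySem.Str.find "ABC" x)) false

-- ===== PRECONDITION & SPEC =====
def Spec_parse_priority_py (raw : String) (out : List String) : Prop := out = parse_priority_py_alt raw
instance (raw : String) (out : List String) : Decidable (Spec_parse_priority_py raw out) := by unfold Spec_parse_priority_py; infer_instance

-- ===== CLAIM (what is proved, stated in full; the proofs are below) =====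
def Claim_equal_parse_priority_py : Prop := ∀ (raw : String), Dom_parse_priority_py raw → Spec_parse_priority_py raw (parse_priority_py raw)

-- ===== LEMMAS AND PROOFS =====

-- A's first-loop step and B's dict-building step, named for the proofs
def pvStepA (out : List String) (x : String) : List String :=
  if (x = "A" ∨ x = "B" ∨ x = "C") ∧ x ∉ out then out ++ [x] else out

def pvStepB (d : PySem.Dict String Int) (it : Int × String) : PySem.Dict String Int :=
  if (it.2 = "A" ∨ it.2 = "B" ∨ it.2 = "C") ∧ d.contains it.2 = false
  then d.insert it.2 it.1 else d

-- any default gives the same getD once the key is present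
theorem pvGetD_congr (d : PySem.Dict String Int) (x : String)
    (h : d.contains x = true) (a b : Int) : d.getD x a = d.getD x b := by
  rw [PySem.Dict.getD_eq_get?_getD, PySem.Dict.getD_eq_get?_getD]
  rw [PySem.Dict.contains_eq_isSome_get?] at h
  cases hg : d.get? x with
  | none => rw [hg] at h; simp at h
  | some v => simp

-- A's second loop appends exactly the canonical letters missing from `out`
theorem pvSecondLoop (out : List String) :
    ["A", "B", "C"].foldl (fun acc x => if x ∉ acc then acc ++ [x] else acc) out
      = out ++ (["A", "B", "C"].filter (fun x => x ∉ out)) := by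
  by_cases hA : ("A" : String) ∈ out <;> by_cases hB : ("B" : String) ∈ out <;>
    by_cases hC : ("C" : String) ∈ out <;>
    simp [List.foldl, List.filter, hA, hB, hC]

-- joint invariant of A's first loop and B's enumerate-fold
theorem pvInv (c : List String) : ∀ (n : Int) (out : List String) (d : PySem.Dict String Int),
    (∀ x, x ∈ out ↔ d.contains x = true) →
    List.Pairwise (fun a b => d.getD a 0 < d.getD b 0) out →
    (∀ x ∈ out, d.getD x 0 < n) →
    (∀ x ∈ out, x ∈ (["A", "B", "C"] : List String)) →
    (∀ x, x ∈ c.foldl pvStepA out ↔ ((PySem.List.enumerate c n).foldl pvStepB d).contains x = true) ∧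
    List.Pairwise (fun a b => ((PySem.List.enumerate c n).foldl pvStepB d).getD a 0 <
      ((PySem.List.enumerate c n).foldl pvStepB d).getD b 0) (c.foldl pvStepA out) ∧
    (∀ x ∈ c.foldl pvStepA out, ((PySem.List.enumerate c n).foldl pvStepB d).getD x 0 < n + c.length) ∧
    (∀ x ∈ c.foldl pvStepA out, x ∈ (["A", "B", "C"] : List String)) := by
  induction c with
  | nil => intro n out d h1 h2 h3 h4; exact ⟨by simpa [PySem.List.enumerate] using h1, by simpa [PySem.List.enumerate] using h2, by simpa [PySem.List.enumerate] using h3, by simpa using h4⟩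
  | cons t c' ih =>
    intro n out d h1 h2 h3 h4
    rw [PySem.List.enumerate_cons]
    simp only [List.foldl_cons]
    by_cases hc : (t = "A" ∨ t = "B" ∨ t = "C") ∧ t ∉ out
    · have hnc : d.contains t = false := by
        have := (h1 t).mpr; by_cases hb : d.contains t = true
        · exact absurd (this hb) hc.2
        · simpa using eq_false_of_ne_true hb
      have hsA : pvStepA out t = out ++ [t] := by simp [pvStepA, hc]
      have hsB : pvStepB d (n, t) = d.insert t n := by simp [pvStepB, hc.1, hnc]
      rw [hsA, hsB]
      have h3' : n + (t :: c').length = (n + 1) + c'.length := by simp; ring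
      rw [h3']
      apply ih (n + 1) (out ++ [t]) (d.insert t n)
      · intro x
        rw [PySem.Dict.contains_insert]
        simp only [List.mem_append, List.mem_singleton, Bool.or_eq_true, beq_iff_eq]
        rw [h1 x]; tauto
      · rw [List.pairwise_append]
        refine ⟨?_, by simp, ?_⟩
        · refine h2.imp_of_mem ?_
          intro a b ha hb hab
          have hat : a ≠ t := fun e => hc.2 (e ▸ ha)
          have hbt : b ≠ t := fun e => hc.2 (e ▸ hb)
          rwa [PySem.Dict.getD_insert_of_ne _ _ _ hat, PySem.Dict.getD_insert_of_ne _ _ _ hbt]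
        · intro a ha b hb
          simp only [List.mem_singleton] at hb
          have hat : a ≠ t := fun e => hc.2 (e ▸ ha)
          rw [hb, PySem.Dict.getD_insert_of_ne _ _ _ hat, PySem.Dict.getD_insert_self]
          exact h3 a ha
      · intro x hx
        rcases List.mem_append.mp hx with hx | hx
        · have hxt : x ≠ t := fun e => hc.2 (e ▸ hx)
          rw [PySem.Dict.getD_insert_of_ne _ _ _ hxt]
          exact lt_trans (h3 x hx) (by omega)
        · simp only [List.mem_singleton] at hx; subst hx
          rw [PySem.Dict.getD_insert_self]; omega
      · intro x hx
        rcases List.mem_append.mp hx with hx | hx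
        · exact h4 x hx
        · simp only [List.mem_singleton] at hx; subst hx; simpa using hc.1
    · have hsA : pvStepA out t = out := by simp only [pvStepA, if_neg hc]
      have hsB : pvStepB d (n, t) = d := by
        simp only [pvStepB]
        rw [if_neg]
        intro ⟨hv, hnc⟩
        apply hc
        refine ⟨hv, fun hm => ?_⟩
        rw [(h1 t).mp hm] at hnc; simp at hnc
      rw [hsA, hsB]
      have h3' : n + (t :: c').length = (n + 1) + c'.length := by simp; ring
      rw [h3']
      exact ih (n + 1) out d h1 h2 (fun x hx => lt_trans (h3 x hx) (by omega)) h4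

-- final assembly: A's list equals B's stable sort of the canonical letters
theorem pvFinal (out : List String) (d : PySem.Dict String Int) (big : Int)
    (h1 : ∀ x, x ∈ out ↔ d.contains x = true)
    (h2 : List.Pairwise (fun a b => d.getD a 0 < d.getD b 0) out)
    (h3 : ∀ x ∈ out, d.getD x 0 < big)
    (h4 : ∀ x ∈ out, x ∈ (["A", "B", "C"] : List String)) :
    out ++ (["A", "B", "C"].filter (fun x => x ∉ out))
      = PySem.List.sorted ["A", "B", "C"]
          (fun x => d.getD x (big + PySem.Str.find "ABC" x)) false := by
  have hnodup : out.Nodup := h2.imp (fun {a b} hab => fun e => by subst e; exact lt_irrefl _ hab)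
  symm
  apply PySem.List.sorted_eq_of_perm_of_pairwise_lt
  · rw [List.perm_ext_iff_of_nodup]
    · intro a
      simp only [List.mem_append, List.mem_filter, decide_eq_true_eq]
      constructor
      · rintro (ha | ⟨ha, _⟩)
        · exact h4 a ha
        · exact ha
      · intro ha
        by_cases hm : a ∈ out
        · exact Or.inl hm
        · exact Or.inr ⟨ha, hm⟩
    · have habc : (["A","B","C"] : List String).Nodup := by decide
      exact List.Nodup.append hnodup (habc.filter _)
        (fun a ha hb => by
          rcases List.mem_filter.mp hb with ⟨_, hnb⟩
          simp only [decide_eq_true_eq] at hnb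
          exact hnb ha)
    · decide
  · rw [List.pairwise_append]
    refine ⟨?_, ?_, ?_⟩
    · refine h2.imp_of_mem ?_
      intro a b ha hb hab
      rw [pvGetD_congr d a ((h1 a).mp ha) _ 0, pvGetD_congr d b ((h1 b).mp hb) _ 0]
      exact hab
    · have hbase : List.Pairwise
          (fun a b => big + PySem.Str.find "ABC" a < big + PySem.Str.find "ABC" b)
          (["A", "B", "C"] : List String) := by
        refine (by decide : List.Pairwise
            (fun a b => PySem.Str.find "ABC" a < PySem.Str.find "ABC" b)
            (["A", "B", "C"] : List String)).imp ?_
        intro a b h; omega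
      refine (List.Pairwise.filter _ hbase).imp_of_mem ?_
      intro a b ha hb hab
      have hca : d.contains a = false := by
        rcases List.mem_filter.mp ha with ⟨_, hna⟩
        have : a ∉ out := by simpa using hna
        by_cases hbb : d.contains a = true
        · exact absurd ((h1 a).mpr hbb) this
        · simpa using eq_false_of_ne_true hbb
      have hcb : d.contains b = false := by
        rcases List.mem_filter.mp hb with ⟨_, hnb⟩
        have : b ∉ out := by simpa using hnb
        by_cases hbb : d.contains b = true
        · exact absurd ((h1 b).mpr hbb) this
        · simpa using eq_false_of_ne_true hbb
      rw [PySem.Dict.getD_of_not_contains _ _ hca, PySem.Dict.getD_of_not_contains _ _ hcb]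
      exact hab
    · intro a ha b hb
      have hfb : (0 : Int) ≤ PySem.Str.find "ABC" b := by
        rcases List.mem_filter.mp hb with ⟨hbm, _⟩
        fin_cases hbm <;> decide
      have hcb : d.contains b = false := by
        rcases List.mem_filter.mp hb with ⟨_, hnb⟩
        have : b ∉ out := by simpa using hnb
        by_cases hbb : d.contains b = true
        · exact absurd ((h1 b).mpr hbb) this
        · simpa using eq_false_of_ne_true hbb
      rw [PySem.Dict.getD_of_not_contains _ _ hcb,
          pvGetD_congr d a ((h1 a).mp ha) _ 0]
      have := h3 a ha; omega

-- ===== VERDICT (by name: the statement is the Claim_ definition above) =====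
theorem parse_priority_py_spec : Claim_equal_parse_priority_py := by
  intro raw _
  unfold Spec_parse_priority_py parse_priority_py parse_priority_py_alt
  simp only []
  by_cases hs : PySem.Str.upper (PySem.Str.strip raw) = ""
  · rw [hs]; decide
  · rw [if_neg hs]
    set ts := (PySem.Str.split? (PySem.Str.upper (PySem.Str.strip raw)) ",").getD [] with hts
    set c := ts.map (fun p => PySem.Str.upper (PySem.Str.strip p)) with hc
    have hfold : ts.foldl
        (fun (out : List String) p =>
          let x := PySem.Str.upper (PySem.Str.strip p)
          if (x = "A" ∨ x = "B" ∨ x = "C") ∧ x ∉ out then out ++ [x] else out) []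
        = c.foldl pvStepA [] := by
      rw [hc, List.foldl_map]; rfl
    rw [hfold]
    obtain ⟨h1, h2, h3, h4⟩ := pvInv c 0 [] PySem.Dict.empty
      (by simp [PySem.Dict.contains_empty]) (by simp) (by simp) (by simp)
    rw [pvSecondLoop]
    have halt : (PySem.List.sorted ["A", "B", "C"]
        (fun x => (((PySem.Str.split? (PySem.Str.upper (PySem.Str.strip raw)) ",").getD []).map
            (fun p => PySem.Str.upper (PySem.Str.strip p)) |> PySem.List.enumerate |>.foldl
              (fun (d : PySem.Dict String Int) it =>
                if (it.2 = "A" ∨ it.2 = "B" ∨ it.2 = "C") ∧ d.contains it.2 = false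
                then d.insert it.2 it.1 else d) PySem.Dict.empty).getD x
          (((((PySem.Str.split? (PySem.Str.upper (PySem.Str.strip raw)) ",").getD []).map
            (fun p => PySem.Str.upper (PySem.Str.strip p))).length : Int)
            + PySem.Str.find "ABC" x)) false)
        = PySem.List.sorted ["A", "B", "C"]
            (fun x => ((PySem.List.enumerate c).foldl pvStepB PySem.Dict.empty).getD x
              ((c.length : Int) + PySem.Str.find "ABC" x)) false := rfl
    rw [halt]
    exact (pvFinal _ _ (c.length : Int) h1 h2 (fun x hx => by have := h3 x hx; omega) h4)
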